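-- pv_equiv track=rewrite | github.com/olivierfriard/BORIS | boris/project_import_export.py | check_text_file_type
-- ===== SOURCE A (Python) =====
-- def check_text_file_type(rows: list):
--     """
--     check text file
--     returns separator and number of fields (if unique)
--     """
--     for separator in "\t,;":
--         cs: list = []
--         for row in rows:
--             cs.append(row.count(separator))
--         if len(set(cs)) == 1:
--             return separator, cs[0] + 1
--     return None, None
-- ===== SOURCE B (Python) =====
-- def _upd(st, n):
--     if st is None:
--         return (n, n)
--     lo, hi = st
--     return (min(lo, n), max(hi, n))
--
--
-- def check_text_file_type(rows: list):
--     """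
--     check text file
--     returns separator and number of fields (if unique)
--     """
--     tab = comma = semi = None  # running (min, max) of per-row counts
--     for row in rows:
--         tab = _upd(tab, row.count("\t"))
--         comma = _upd(comma, row.count(","))
--         semi = _upd(semi, row.count(";"))
--     for sep, st in (("\t", tab), (",", comma), (";", semi)):
--         if st is not None and st[0] == st[1]:
--             return sep, st[0] + 1
--     return None, None
-- ===== Notes on version B (the rewrite author's own statement) =====
-- stated objective: alternative
-- what changed: B streams the rows once keeping only a running (min,max) pair of per-row counts for each candidate separator (O(1) extra memory, no count lists, no set), then picks the first separator in priority order whose min equals max -- uniformity is decided by a range check on a streamed aggregate instead of A's materialised count list and set cardinality.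
import Mathlib
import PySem

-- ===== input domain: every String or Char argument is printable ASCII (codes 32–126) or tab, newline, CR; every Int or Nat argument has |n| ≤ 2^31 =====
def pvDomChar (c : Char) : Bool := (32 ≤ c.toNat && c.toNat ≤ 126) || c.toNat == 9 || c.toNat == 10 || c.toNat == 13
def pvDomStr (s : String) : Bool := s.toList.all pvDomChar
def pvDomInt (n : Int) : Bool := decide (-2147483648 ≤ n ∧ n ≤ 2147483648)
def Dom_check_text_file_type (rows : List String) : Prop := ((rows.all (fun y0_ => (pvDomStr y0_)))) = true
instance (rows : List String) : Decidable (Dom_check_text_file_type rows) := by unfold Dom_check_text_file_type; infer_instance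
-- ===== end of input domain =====

-- B streams the rows once keeping only a running (min,max) of per-row counts per separator and
-- picks the first separator whose min equals max (objective: alternative — O(1) extra space).

-- ===== PORT A =====
-- outer loop 'for separator in "\t,;"'; inner loop builds cs by appending row.count(separator)
def pvALoop (rows : List String) : List String → Option String × Option Int
  | [] => (none, none)
  | sep :: seps =>
    let cs : List Int := rows.foldl (fun acc row => acc ++ [((PySem.Str.count row sep : Nat) : Int)]) []
    if (PySem.Set.ofList cs).length = 1 then (some sep, some (PySem.List.pyGetD cs 0 0 + 1))
    else pvALoop rows seps

def check_text_file_type (rows : List String) : Option String × Option Int :=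
  pvALoop rows ["\t", ",", ";"]

-- ===== PORT B =====
-- _upd: fold one count into a running (min, max) pair (None = nothing seen yet)
def pvUpd (st : Option (Int × Int)) (n : Int) : Option (Int × Int) :=
  match st with
  | none => some (n, n)
  | some (lo, hi) => some (min lo n, max hi n)

-- the single pass over rows updating the three running (min, max) pairs
def pvBScan (rows : List String) :
    Option (Int × Int) × Option (Int × Int) × Option (Int × Int) :=
  rows.foldl
    (fun s row =>
      (pvUpd s.1 ((PySem.Str.count row "\t" : Nat) : Int),
       pvUpd s.2.1 ((PySem.Str.count row "," : Nat) : Int),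
       pvUpd s.2.2 ((PySem.Str.count row ";" : Nat) : Int)))
    (none, none, none)

-- the final pick: first separator whose running min equals its running max
def pvBPick : List (String × Option (Int × Int)) → Option String × Option Int
  | [] => (none, none)
  | (sep, st) :: rest =>
    match st with
    | none => pvBPick rest
    | some (lo, hi) => if lo == hi then (some sep, some (lo + 1)) else pvBPick rest

def check_text_file_type_alt (rows : List String) : Option String × Option Int :=
  let s := pvBScan rows
  pvBPick [("\t", s.1), (",", s.2.1), (";", s.2.2)]

-- ===== PRECONDITION & SPEC =====
def Spec_check_text_file_type (rows : List String) (out : Option String × Option Int) : Prop := out = check_text_file_type_alt rows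
instance (rows : List String) (out : Option String × Option Int) : Decidable (Spec_check_text_file_type rows out) := by unfold Spec_check_text_file_type; infer_instance

-- ===== CLAIM =====
def Claim_equal_check_text_file_type : Prop := ∀ (rows : List String), Dom_check_text_file_type rows → Spec_check_text_file_type rows (check_text_file_type rows)

-- ===== LEMMAS AND PROOFS =====

-- len(set(cs)) == 1 for a nonempty cs means: every element equals the head
lemma pv_setlen_one (c : Int) (l : List Int) :
    (PySem.Set.ofList (c :: l)).length = 1 ↔ ∀ x ∈ l, x = c := by
  constructor
  · intro h x hx
    obtain ⟨a, ha⟩ := List.length_eq_one_iff.mp h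
    have hc : c ∈ PySem.Set.ofList (c :: l) := (PySem.Set.mem_ofList _ _).mpr (by simp)
    have hxm : x ∈ PySem.Set.ofList (c :: l) := (PySem.Set.mem_ofList _ _).mpr (by simp [hx])
    rw [ha] at hc hxm
    simp at hc hxm; omega
  · intro h
    have hmem : ∀ y ∈ PySem.Set.ofList (c :: l), y = c := by
      intro y hy
      have hy' := (PySem.Set.mem_ofList (c :: l) y).mp hy
      rcases List.mem_cons.mp hy' with h1 | h1
      · exact h1
      · exact h _ h1
    have hnd := PySem.Set.nodup_ofList (c :: l)
    have hc : c ∈ PySem.Set.ofList (c :: l) := (PySem.Set.mem_ofList _ _).mpr (by simp)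
    cases hS : PySem.Set.ofList (c :: l) with
    | nil => rw [hS] at hc; simp at hc
    | cons y rest =>
      rw [hS] at hmem hnd
      have hy : y = c := hmem y (by simp)
      have : rest = [] := by
        cases rest with
        | nil => rfl
        | cons z zs =>
          have hz : z = c := hmem z (by simp)
          have hyz : y = z := hy.trans hz.symm
          have hnin : y ∉ z :: zs := (List.nodup_cons.mp hnd).1
          exact absurd (by simp [hyz]) hnin
      simp [this]

-- folding pvUpd from a (lo,hi) seed is the pair of a min-fold and a max-fold
lemma pv_foldl_upd_some (l : List Int) (a b : Int) :
    l.foldl pvUpd (some (a, b)) = some (l.foldl min a, l.foldl max b) := by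
  induction l generalizing a b with
  | nil => rfl
  | cons x xs ih => simp [pvUpd, ih]

-- min-fold meets max-fold exactly when everything seen is one value
lemma pv_minmax_eq (l : List Int) (a b : Int) (hab : a ≤ b) :
    (l.foldl min a = l.foldl max b) ↔ (a = b ∧ ∀ x ∈ l, x = a) := by
  induction l generalizing a b with
  | nil =>
    simp only [List.foldl_nil, List.not_mem_nil, false_implies, implies_true, and_true]
  | cons x xs ih =>
    simp only [List.foldl_cons, List.mem_cons]
    rw [ih (min a x) (max b x) (by omega)]
    constructor
    · rintro ⟨h1, h2⟩
      have hax : a = b ∧ x = a := by omega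
      refine ⟨hax.1, ?_⟩
      intro y hy
      rcases hy with rfl | hy
      · exact hax.2
      · have := h2 y hy; omega
    · rintro ⟨rfl, h⟩
      have hx : x = a := h x (Or.inl rfl)
      constructor
      · omega
      · intro y hy
        have := h y (Or.inr hy); omega

-- a fold of min (resp. max) over an all-equal list stays at the seed
lemma pv_foldl_min_const (c0 : Int) (l : List Int) (h : ∀ x ∈ l, x = c0) :
    l.foldl min c0 = c0 := by
  induction l with
  | nil => rfl
  | cons y ys ih =>
    have hy : y = c0 := h y (by simp)
    rw [List.foldl_cons, hy, min_self]
    exact ih (fun z hz => h z (by simp [hz]))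

lemma pv_foldl_max_const (c0 : Int) (l : List Int) (h : ∀ x ∈ l, x = c0) :
    l.foldl max c0 = c0 := by
  induction l with
  | nil => rfl
  | cons y ys ih =>
    have hy : y = c0 := h y (by simp)
    rw [List.foldl_cons, hy, max_self]
    exact ih (fun z hz => h z (by simp [hz]))

-- the streamed (min,max) per separator is the pvUpd-fold over that separator's count list
lemma pv_scan_eq (rows : List String) (a b c : Option (Int × Int)) :
    rows.foldl
      (fun s row =>
        (pvUpd s.1 ((PySem.Str.count row "\t" : Nat) : Int),
         pvUpd s.2.1 ((PySem.Str.count row "," : Nat) : Int),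
         pvUpd s.2.2 ((PySem.Str.count row ";" : Nat) : Int)))
      (a, b, c)
    = ((rows.map (fun r => ((PySem.Str.count r "\t" : Nat) : Int))).foldl pvUpd a,
       (rows.map (fun r => ((PySem.Str.count r "," : Nat) : Int))).foldl pvUpd b,
       (rows.map (fun r => ((PySem.Str.count r ";" : Nat) : Int))).foldl pvUpd c) := by
  induction rows generalizing a b c with
  | nil => simp
  | cons r rs ih => rw [List.foldl_cons, ih]; simp

-- A's separator loop equals B's pick over the streamed aggregates
lemma pv_loop_eq (rows : List String) (seps : List String) :
    pvALoop rows seps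
      = pvBPick (seps.map (fun sep =>
          (sep, (rows.map (fun r => ((PySem.Str.count r sep : Nat) : Int))).foldl pvUpd none))) := by
  induction seps with
  | nil => simp [pvALoop, pvBPick]
  | cons sep rest ih =>
    rw [List.map_cons]
    rw [pvALoop]
    rw [PySem.List.foldl_append_singleton_eq_map]
    cases hcs : rows.map (fun r => ((PySem.Str.count r sep : Nat) : Int)) with
    | nil =>
      simp [pvBPick, PySem.Set.ofList, PySem.Set.empty, List.foldl, ih]
    | cons c0 cs' =>
      simp only [List.nil_append]
      have hfold : List.foldl pvUpd none (c0 :: cs')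
          = some (cs'.foldl min c0, cs'.foldl max c0) := by
        show List.foldl pvUpd (some (c0, c0)) cs' = _
        exact pv_foldl_upd_some cs' c0 c0
      rw [hfold]
      by_cases h : ∀ x ∈ cs', x = c0
      · have hA : (PySem.Set.ofList (c0 :: cs')).length = 1 := (pv_setlen_one c0 cs').mpr h
        have hmin : cs'.foldl min c0 = c0 := pv_foldl_min_const c0 cs' h
        have hmax : cs'.foldl max c0 = c0 := pv_foldl_max_const c0 cs' h
        simp [pvBPick, hA, hmin, hmax, PySem.List.pyGetD]
      · have hA : ¬ (PySem.Set.ofList (c0 :: cs')).length = 1 := by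
          intro hl; exact h ((pv_setlen_one c0 cs').mp hl)
        have hmm : ¬ cs'.foldl min c0 = cs'.foldl max c0 := by
          intro he
          exact h ((pv_minmax_eq cs' c0 c0 le_rfl).mp he).2
        simp [pvBPick, hA, hmm, ih]

-- ===== VERDICT =====
theorem check_text_file_type_spec : Claim_equal_check_text_file_type := by
  intro rows _
  show check_text_file_type rows = check_text_file_type_alt rows
  rw [check_text_file_type, check_text_file_type_alt, pvBScan, pv_scan_eq, pv_loop_eq]
  simp
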